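-- pv_equiv track=rewrite | github.com/daniel-reich/ubiquitous-fiesta | a6XHqehbttHnjE7bK_9.py | is_repdigit
-- ===== SOURCE A (Python) =====
-- def is_repdigit(num):
--   res = False
--   num = str(num)
--   for ch in num:
--     if ch == num[0]:
--       res = True
--     else:
--       res = False
--       break
--
--   return res
-- ===== SOURCE B (Python) =====
-- def is_repdigit(num):
--   return len(set(str(num))) == 1
-- ===== Notes on version B (the rewrite author's own statement) =====
-- stated objective: idiomatic
-- what changed: Replaces the early-break loop with a running boolean flag by building the set of distinct characters of str(num) and testing that it has exactly one element.
import Mathlib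
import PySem

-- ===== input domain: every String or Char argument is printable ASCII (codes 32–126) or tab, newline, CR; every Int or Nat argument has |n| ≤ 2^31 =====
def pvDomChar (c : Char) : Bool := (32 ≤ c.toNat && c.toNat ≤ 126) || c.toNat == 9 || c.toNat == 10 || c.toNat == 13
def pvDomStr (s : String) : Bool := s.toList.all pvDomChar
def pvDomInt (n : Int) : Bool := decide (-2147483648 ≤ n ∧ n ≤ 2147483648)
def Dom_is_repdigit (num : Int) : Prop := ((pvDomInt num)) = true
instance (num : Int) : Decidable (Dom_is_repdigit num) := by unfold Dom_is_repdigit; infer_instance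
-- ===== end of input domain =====

-- B replaces A's early-break loop with a flag by testing that the set of distinct
-- characters of str(num) has exactly one element (idiomatic; same cost).

-- ===== PORT A =====
-- A's loop: res = False; for ch in s: if ch == s[0]: res = True else: res = False; break
def isRepdigitLoop (first : Char) (res : Bool) : List Char → Bool
  | [] => res
  | c :: rest => if c == first then isRepdigitLoop first true rest else false

def is_repdigit (num : Int) : Bool :=
  let s := PySem.Int.toChars num
  match s with
  | [] => false            -- loop body never runs; res stays False (str(int) is never empty)
  | h :: _ => isRepdigitLoop h false s

-- ===== PORT B =====
def is_repdigit_alt (num : Int) : Bool :=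
  (PySem.Set.ofList (PySem.Int.toChars num)).length == 1

-- ===== PRECONDITION & SPEC =====
def Spec_is_repdigit (num : Int) (out : Bool) : Prop := out = is_repdigit_alt num
instance (num : Int) (out : Bool) : Decidable (Spec_is_repdigit num out) := by unfold Spec_is_repdigit; infer_instance

-- ===== CLAIM (what is proved, stated in full; the proofs are below) =====
def Claim_equal_is_repdigit : Prop := ∀ (num : Int), Dom_is_repdigit num → Spec_is_repdigit num (is_repdigit num)

-- ===== LEMMAS AND PROOFS =====

-- once res is True, the loop is 'all remaining chars equal first'
theorem isRepdigitLoop_true (first : Char) (t : List Char) :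
    isRepdigitLoop first true t = t.all (· == first) := by
  induction t with
  | nil => rfl
  | cons c rest ih =>
      simp only [isRepdigitLoop, List.all_cons]
      by_cases h : (c == first) = true
      · simp [h, ih]
      · simp [Bool.eq_false_iff.mpr h]

-- Set.add never shrinks, so a fold of adds never shrinks
theorem length_le_foldl_add (t : List Char) (s : PySem.Set Char) :
    s.length ≤ (t.foldl PySem.Set.add s).length := by
  induction t generalizing s with
  | nil => simp
  | cons c rest ih =>
      refine le_trans ?_ (ih (PySem.Set.add s c))
      simp only [PySem.Set.add]
      split
      · exact le_refl _
      · simp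

-- distinct-character count of h :: t is 1 exactly when every char of t equals h
theorem foldl_add_len_one (h : Char) (t : List Char) :
    ((t.foldl PySem.Set.add [h]).length == 1) = t.all (· == h) := by
  induction t with
  | nil => rfl
  | cons c rest ih =>
      simp only [List.foldl_cons, List.all_cons]
      by_cases hc : (c == h) = true
      · have heq : PySem.Set.add [h] c = [h] := by
          have : c = h := by simpa using hc
          simp [PySem.Set.add, PySem.Set.contains, this]
        rw [heq]
        simp [hc, ih]
      · have hadd : PySem.Set.add [h] c = [h, c] := by
          have hne : ¬ c = h := by simpa using hc
          simp [PySem.Set.add, PySem.Set.contains, hne]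
        rw [hadd]
        have hlen := length_le_foldl_add rest [h, c]
        have hfalse : ((rest.foldl PySem.Set.add [h, c]).length == 1) = false := by
          simp at hlen ⊢
          omega
        simp [hfalse, Bool.eq_false_iff.mpr hc]

theorem ofList_len_one (h : Char) (t : List Char) :
    ((PySem.Set.ofList (h :: t)).length == 1) = t.all (· == h) := by
  have base : PySem.Set.ofList (h :: t) = t.foldl PySem.Set.add [h] := by
    simp [PySem.Set.ofList_eq_foldl, List.foldl_cons, PySem.Set.add, PySem.Set.contains]
  rw [base, foldl_add_len_one]

-- ===== VERDICT (by name: the statement is the Claim_ definition above) =====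
theorem is_repdigit_spec : Claim_equal_is_repdigit := by
  intro num _
  unfold Spec_is_repdigit is_repdigit is_repdigit_alt
  cases hs : PySem.Int.toChars num with
  | nil => simp [PySem.Set.ofList_eq_foldl]
  | cons h t =>
      simp only
      rw [show isRepdigitLoop h false (h :: t) = isRepdigitLoop h true t by
            simp [isRepdigitLoop],
          isRepdigitLoop_true, ofList_len_one]
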